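-- pv_equiv track=rewrite | github.com/Stealth-py/The12Rings-Cipher-Bot | Ciphers/secret_cipher.py | ensec_cipher
-- ===== SOURCE A (Python) =====
-- d = {
--     7: ['a', 'm', 'y'],
--     33: ['b', 'n', 'z'],
--     34: ['b', 'n', 'z'],
--     23: ['c', 'o'],
--     11: ['d', 'p'],
--     15: ['e', 'q'],
--     43: ['f', 'r'],
--     44: ['f', 'r'],
--     39: ['g', 's'],
--     29: ['h', 't'],
--     21: ['i', 'u'],
--     25: ['j', 'v'],
--     13: ['k', 'w'],
--     35: ['l', 'x']
-- }
--
-- def ensec_cipher(inp):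
--     inp = inp.split('.')
--     inp = ''.join(inp)
--     res = []
--     for i in inp:
--         for j in d:
--             if i in d[j]:
--                 res.append(j)
--     return res
-- ===== SOURCE B (Python) =====
-- # keys for letter-row r = (ord(c)-97) % 12; rows repeat every 12 letters (a/m/y, b/n/z, ...)
-- _rows = [[7], [33, 34], [23], [11], [15], [43, 44], [39], [29], [21], [25], [13], [35]]
--
-- def ensec_cipher(inp):
--     res = []
--     for ch in inp:
--         o = ord(ch)
--         if 97 <= o <= 122:
--             res += _rows[(o - 97) % 12]
--     return res
-- ===== Notes on version B (the rewrite author's own statement) =====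
-- stated objective: simpler
-- what changed: B drops the dictionary entirely: the cipher is the periodic pattern key-row = (ord(c)-97) % 12 over lowercase letters, so B does one arithmetic table lookup per character and skips A's split/join dot-stripping pass and per-character scan over all 14 dict keys ('.' contributes nothing anyway).
import Mathlib
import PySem

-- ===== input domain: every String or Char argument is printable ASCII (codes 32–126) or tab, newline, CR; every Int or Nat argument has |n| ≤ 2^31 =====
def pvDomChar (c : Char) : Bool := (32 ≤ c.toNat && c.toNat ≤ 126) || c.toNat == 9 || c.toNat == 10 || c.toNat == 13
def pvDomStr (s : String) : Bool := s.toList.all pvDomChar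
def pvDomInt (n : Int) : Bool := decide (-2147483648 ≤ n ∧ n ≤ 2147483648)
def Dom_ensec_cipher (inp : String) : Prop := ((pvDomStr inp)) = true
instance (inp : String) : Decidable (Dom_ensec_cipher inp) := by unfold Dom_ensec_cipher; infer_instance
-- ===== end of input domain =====

-- B drops A's dictionary and split/join pass: the cipher is the periodic pattern row = (ord(c)-97) % 12
-- over lowercase letters, so B does one arithmetic table lookup per character (objective: simpler).

-- ===== PORT A =====
-- the module-level dict d
def pvDictA : PySem.Dict Int (List Char) := PySem.Dict.ofList
  [(7, ['a','m','y']), (33, ['b','n','z']), (34, ['b','n','z']), (23, ['c','o']),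
   (11, ['d','p']), (15, ['e','q']), (43, ['f','r']), (44, ['f','r']),
   (39, ['g','s']), (29, ['h','t']), (21, ['i','u']), (25, ['j','v']),
   (13, ['k','w']), (35, ['l','x'])]

def ensec_cipher (inp : String) : List Int :=
  -- inp = inp.split('.'); inp = ''.join(inp)
  let parts := (PySem.Str.split? inp ".").getD []
  let s := PySem.Str.join "" parts
  -- for i in inp: for j in d: if i in d[j]: res.append(j)   (iterating d yields its keys j with values d[j])
  s.toList.foldl
    (fun res i =>
      pvDictA.items.foldl (fun res p => if p.2.contains i then res ++ [p.1] else res) res)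
    []

-- ===== PORT B =====
-- _rows[r]: the keys for letter-row r (rows repeat every 12 letters: a/m/y, b/n/z, ...)
def pvRows : List (List Int) :=
  [[7], [33, 34], [23], [11], [15], [43, 44], [39], [29], [21], [25], [13], [35]]

def ensec_cipher_alt (inp : String) : List Int :=
  inp.toList.foldl
    (fun res ch =>
      let o := ch.toNat
      if 97 ≤ o ∧ o ≤ 122 then res ++ pvRows.getD ((o - 97) % 12) [] else res)
    []

-- ===== PRECONDITION & SPEC =====
def Spec_ensec_cipher (inp : String) (out : List Int) : Prop := out = ensec_cipher_alt inp
instance (inp : String) (out : List Int) : Decidable (Spec_ensec_cipher inp out) := by unfold Spec_ensec_cipher; infer_instance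

-- ===== CLAIM (what is proved, stated in full; the proofs are below) =====
def Claim_equal_ensec_cipher : Prop := ∀ (inp : String), Dom_ensec_cipher inp → Spec_ensec_cipher inp (ensec_cipher inp)

-- ===== LEMMAS AND PROOFS =====

-- A's per-character contribution
def pvFA (i : Char) : List Int := (pvDictA.items.filter (fun p => p.2.contains i)).map (fun p => p.1)
-- B's per-character contribution
def pvFB (c : Char) : List Int :=
  if 97 ≤ c.toNat ∧ c.toNat ≤ 122 then pvRows.getD ((c.toNat - 97) % 12) [] else []

-- join with empty separator is flatten
lemma pv_join_nil_flatten (parts : List (List Char)) :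
    PySem.Chars.join [] parts = parts.flatten := by
  induction parts with
  | nil => rfl
  | cons a t ih =>
    cases t with
    | nil => simp [PySem.Chars.join, List.intercalate]
    | cons b t' =>
      simp only [PySem.Chars.join, List.intercalate] at ih ⊢
      simp [List.intersperse, List.flatten] at ih ⊢
      exact ih

-- flatten of splitOn on a single-char separator removes exactly that character
lemma pv_go_flatten (fuel : Nat) :
    ∀ (l cur : List Char) (acc : List (List Char)), l.length < fuel →
    (PySem.Chars.splitOn.go ['.'] fuel l cur acc).flatten
      = acc.reverse.flatten ++ cur.reverse ++ l.filter (fun c => c != '.') := by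
  induction fuel with
  | zero => intro l cur acc h; exact absurd h (by omega)
  | succ f ih =>
    intro l cur acc h
    cases l with
    | nil =>
      rw [PySem.Chars.splitOn.go.eq_def]
      simp
    | cons c rest =>
      rw [PySem.Chars.splitOn.go.eq_def]
      by_cases hc : c = '.'
      · subst hc
        have h' : rest.length < f := by simpa using Nat.lt_of_succ_lt_succ h
        simp [List.isPrefixOf, ih _ _ _ h', List.filter]
      · have h' : rest.length < f := Nat.lt_of_succ_lt_succ h
        have hcc : ('.' == c) = false := by simp; exact fun hh => absurd hh.symm hc
        have hne : (c != '.') = true := by simp [hc]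
        simp [List.isPrefixOf, hcc, ih _ _ _ h', List.filter, hne]

lemma pv_strip_dots (inp : String) :
    (PySem.Str.join "" ((PySem.Str.split? inp ".").getD [])).toList
      = inp.toList.filter (fun c => c != '.') := by
  have hs : PySem.Str.split? inp "." =
      some ((PySem.Chars.splitOn inp.toList ['.']).map String.ofList) := by
    simp [PySem.Str.split?, PySem.Chars.split?]
  rw [hs]
  rw [PySem.Str.toList_join]
  have hm : ((PySem.Chars.splitOn inp.toList ['.']).map String.ofList).map String.toList
      = PySem.Chars.splitOn inp.toList ['.'] := by
    rw [List.map_map]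
    simp [Function.comp_def]
  rw [Option.getD_some, hm]
  show PySem.Chars.join "".toList _ = _
  have : ("" : String).toList = [] := rfl
  rw [this, pv_join_nil_flatten]
  unfold PySem.Chars.splitOn
  have := pv_go_flatten (inp.toList.length + 1) inp.toList [] [] (by omega)
  simpa using this

-- A and B agree on each character with code < 127 (covers the whole input domain)
set_option maxRecDepth 4000 in
lemma pv_char_eq : ∀ n : Nat, n < 127 → pvFA (Char.ofNat n) = pvFB (Char.ofNat n) := by decide

lemma pv_char_eq' (c : Char) (h : pvDomChar c = true) : pvFA c = pvFB c := by
  have hn : c.toNat < 127 := by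
    simp [pvDomChar] at h
    omega
  have := pv_char_eq c.toNat hn
  rwa [Char.ofNat_toNat] at this

lemma pv_flatMap_congr (f g : Char → List Int) (l : List Char)
    (h : ∀ c ∈ l, f c = g c) : l.flatMap f = l.flatMap g := by
  rw [List.flatMap_def, List.flatMap_def, List.map_congr_left h]

-- dropping characters that contribute nothing does not change the flatMap
lemma pv_flatMap_filter (l : List Char) (h : pvFB '.' = []) :
    (l.filter (fun c => c != '.')).flatMap pvFB = l.flatMap pvFB := by
  induction l with
  | nil => rfl
  | cons c t ih =>
    by_cases hc : c = '.'
    · subst hc; simp [List.filter, ih, h]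
    · have : (c != '.') = true := by simp [hc]
      simp [List.filter, this, ih]

-- B's foldl over the guarded append is the flatMap of pvFB
lemma pv_alt_flatMap (inp : String) : ensec_cipher_alt inp = inp.toList.flatMap pvFB := by
  unfold ensec_cipher_alt
  have : ∀ (l : List Char) (acc : List Int),
      l.foldl (fun res ch =>
        let o := ch.toNat
        if 97 ≤ o ∧ o ≤ 122 then res ++ pvRows.getD ((o - 97) % 12) [] else res) acc
      = acc ++ l.flatMap pvFB := by
    intro l
    induction l with
    | nil => intro acc; simp
    | cons c t ih =>
      intro acc
      rw [List.foldl_cons, ih, List.flatMap_cons]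
      by_cases hc : 97 ≤ c.toNat ∧ c.toNat ≤ 122 <;> simp [pvFB, hc]
  simpa using this inp.toList []

-- ===== VERDICT (by name: the statement is the Claim_ definition above) =====
theorem ensec_cipher_spec : Claim_equal_ensec_cipher := by
  intro inp hdom
  unfold Spec_ensec_cipher ensec_cipher
  simp only [PySem.List.foldl_append_if, PySem.List.foldl_append_eq_flatMap]
  rw [pv_strip_dots inp, pv_alt_flatMap]
  show (inp.toList.filter (fun c => c != '.')).flatMap pvFA = inp.toList.flatMap pvFB
  have hdom' : ∀ c ∈ inp.toList, pvDomChar c = true := by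
    have := hdom; unfold Dom_ensec_cipher pvDomStr at this
    simpa [List.all_eq_true] using this
  rw [pv_flatMap_congr pvFA pvFB _ (fun c hc =>
    pv_char_eq' c (hdom' c (List.mem_of_mem_filter hc)))]
  exact pv_flatMap_filter _ (by decide)
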